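-- pv_equiv track=rewrite | github.com/Yeonghun1675/textminer | libs/extract_table_xml.py | word_list_revise
-- ===== SOURCE A (Python) =====
-- def word_list_revise(listofWords,chemical_list):
-- 	crit = 0
-- 	crit2 = len(listofWords) - 1
-- 	while crit != crit2 and len(listofWords) != 0:
-- 		if any((listofWords[crit] +' '+ listofWords[crit+1]) in s for s in chemical_list):
-- 			listofWords[crit] = listofWords[crit] +' '+ listofWords[crit+1]
-- 			del listofWords[crit+1]
-- 			crit2 -= 1
-- 		else:
-- 			crit += 1
-- 	return listofWords
-- ===== SOURCE B (Python) =====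
-- def word_list_revise(listofWords, chemical_list):
--     # One forward pass with an accumulator: grow a current phrase while it still
--     # occurs inside some chemical name, otherwise flush it. Note: unlike the
--     # original, this does not mutate listofWords in place (return value is equal).
--     if not listofWords:
--         return []
--     out = []
--     cur = listofWords[0]
--     for w in listofWords[1:]:
--         cand = cur + ' ' + w
--         if any(cand in s for s in chemical_list):
--             cur = cand
--         else:
--             out.append(cur)
--             cur = w
--     out.append(cur)
--     return out
-- ===== Notes on version B (the rewrite author's own statement) =====
-- stated objective: simpler
-- what changed: A repeatedly rewrites and deletes inside the mutable list via an index that restarts merging in place; B is a single forward pass with an accumulator that grows the current phrase while it is still a substring of some chemical and flushes it otherwise (B does not mutate its argument; return values are equal).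
import Mathlib
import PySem

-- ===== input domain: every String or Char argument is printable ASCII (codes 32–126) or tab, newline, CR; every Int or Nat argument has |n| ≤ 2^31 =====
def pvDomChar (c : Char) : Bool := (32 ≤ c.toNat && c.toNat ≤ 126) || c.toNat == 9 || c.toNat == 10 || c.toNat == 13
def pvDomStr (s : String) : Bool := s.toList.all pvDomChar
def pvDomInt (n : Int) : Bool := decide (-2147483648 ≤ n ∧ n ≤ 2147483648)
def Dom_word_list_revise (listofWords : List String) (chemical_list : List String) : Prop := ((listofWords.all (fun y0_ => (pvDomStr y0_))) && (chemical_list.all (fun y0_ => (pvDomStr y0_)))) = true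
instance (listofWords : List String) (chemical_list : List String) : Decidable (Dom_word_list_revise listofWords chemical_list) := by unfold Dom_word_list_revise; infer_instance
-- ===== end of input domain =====

-- B replaces A's index/del loop over a mutable list by a single forward pass with an
-- accumulator (objective: simpler). A mutates listofWords in place; the equivalence
-- proved here is about the return value only (B does not mutate its argument).

-- ===== PORT A =====
-- A's while loop over the mutable list and the index crit.  Python maintains
-- crit ≤ crit2 = len(listofWords)-1, so its loop condition
-- 'crit != crit2 and len(listofWords) != 0' is transliterated as crit+1 < length
-- (equivalent whenever crit ≤ len-1, which always holds from crit = 0; it also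
-- makes both list accesses visibly in range and the recursion total).
def wlrLoopA (chemical_list : List String) (ws : List String) (crit : Nat) : List String :=
  if h : crit + 1 < ws.length then
    if chemical_list.any (fun s => PySem.Str.isIn (ws.getD crit "" ++ " " ++ ws.getD (crit + 1) "") s) then
      -- listofWords[crit] = listofWords[crit] + ' ' + listofWords[crit+1]; del listofWords[crit+1]
      wlrLoopA chemical_list ((ws.set crit (ws.getD crit "" ++ " " ++ ws.getD (crit + 1) "")).eraseIdx (crit + 1)) crit
    else
      wlrLoopA chemical_list ws (crit + 1)
  else ws
termination_by ws.length - crit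
decreasing_by
  · rw [List.length_eraseIdx_of_lt (by simpa using h), List.length_set]; omega
  · omega

def word_list_revise (listofWords : List String) (chemical_list : List String) : List String :=
  wlrLoopA chemical_list listofWords 0

-- ===== PORT B =====
-- the for-loop of Source B: cur is the growing phrase, acc the flushed phrases (reversed)
def wlrLoopB (chemical_list : List String) (cur : String) (rest : List String) (acc : List String) : List String :=
  match rest with
  | [] => (cur :: acc).reverse
  | w :: rest' =>
    let cand := cur ++ " " ++ w
    if chemical_list.any (fun s => PySem.Str.isIn cand s) then
      wlrLoopB chemical_list cand rest' acc
    else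
      wlrLoopB chemical_list w rest' (cur :: acc)

def word_list_revise_alt (listofWords : List String) (chemical_list : List String) : List String :=
  match listofWords with
  | [] => []
  | w :: rest => wlrLoopB chemical_list w rest []

-- ===== PRECONDITION & SPEC =====
def Spec_word_list_revise (listofWords : List String) (chemical_list : List String) (out : List String) : Prop := out = word_list_revise_alt listofWords chemical_list
instance (listofWords : List String) (chemical_list : List String) (out : List String) : Decidable (Spec_word_list_revise listofWords chemical_list out) := by unfold Spec_word_list_revise; infer_instance

-- ===== CLAIM (what is proved, stated in full; the proofs are below) =====
def Claim_equal_word_list_revise : Prop := ∀ (listofWords : List String) (chemical_list : List String), Dom_word_list_revise listofWords chemical_list → Spec_word_list_revise listofWords chemical_list (word_list_revise listofWords chemical_list)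

-- ===== LEMMAS AND PROOFS =====

-- direct (non-accumulator) version of B's loop, used only in the proofs
def wlrLoopBd (chemical_list : List String) (cur : String) (rest : List String) : List String :=
  match rest with
  | [] => [cur]
  | w :: rest' =>
    let cand := cur ++ " " ++ w
    if chemical_list.any (fun s => PySem.Str.isIn cand s) then
      wlrLoopBd chemical_list cand rest'
    else
      cur :: wlrLoopBd chemical_list w rest'

theorem wlrLoopB_eq_acc (chemical_list : List String) (rest : List String) :
    ∀ (cur : String) (acc : List String),
      wlrLoopB chemical_list cur rest acc = acc.reverse ++ wlrLoopBd chemical_list cur rest := by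
  induction rest with
  | nil => intro cur acc; simp [wlrLoopB, wlrLoopBd]
  | cons w rest' ih =>
    intro cur acc
    simp only [wlrLoopB, wlrLoopBd]
    split_ifs with h
    · exact ih _ _
    · rw [ih]; simp

-- after the in-place merge+delete, the list is  take crit ++ merged :: drop (crit+2)
theorem wlr_set_erase (ws : List String) (crit : Nat) (m : String) (h : crit + 1 < ws.length) :
    (ws.set crit m).eraseIdx (crit + 1) = ws.take crit ++ m :: ws.drop (crit + 2) := by
  have hc : crit < ws.length := by omega
  rw [List.set_eq_take_append_cons_drop, if_pos hc]
  have h1 : ws.take crit ++ m :: ws.drop (crit + 1) = (ws.take crit ++ [m]) ++ ws.drop (crit + 1) := by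
    simp
  have hlt : (ws.take crit ++ [m]).length = crit + 1 := by
    simp [List.length_take]; omega
  rw [h1, List.eraseIdx_append_of_length_le (le_of_eq hlt), hlt]
  have h2 : ∀ l : List String, l.eraseIdx 0 = l.tail := by intro l; cases l <;> rfl
  simp [h2, List.tail_drop]

-- main invariant: A's loop from index crit equals the untouched prefix plus B's
-- loop run on the current word and the remaining words
theorem wlrLoopA_eq (chemical_list : List String) :
    ∀ (n : Nat) (ws : List String) (crit : Nat), ws.length - crit ≤ n → crit < ws.length →
      wlrLoopA chemical_list ws crit =
        ws.take crit ++ wlrLoopBd chemical_list (ws.getD crit "") (ws.drop (crit + 1)) := by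
  intro n
  induction n with
  | zero => intro ws crit hn hc; omega
  | succ n ih =>
    intro ws crit hn hc
    have hA : (ws.take crit).length = crit := by rw [List.length_take]; omega
    rw [wlrLoopA]
    by_cases h : crit + 1 < ws.length
    · rw [dif_pos h]
      have hdrop : ws.drop (crit + 1) = ws.getD (crit + 1) "" :: ws.drop (crit + 2) := by
        rw [List.drop_eq_getElem_cons h]
        simp [List.getD_eq_getElem?_getD, List.getElem?_eq_getElem h]
      split_ifs with hin
      · -- merge branch
        set m := ws.getD crit "" ++ " " ++ ws.getD (crit + 1) "" with hm
        have hse := wlr_set_erase ws crit m h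
        have hlen : ((ws.set crit m).eraseIdx (crit + 1)).length = ws.length - 1 := by
          rw [List.length_eraseIdx_of_lt (by simpa using h), List.length_set]
        rw [ih ((ws.set crit m).eraseIdx (crit + 1)) crit (by omega) (by omega)]
        rw [hse]
        have htake : (ws.take crit ++ m :: ws.drop (crit + 2)).take crit = ws.take crit := by
          rw [List.take_append_of_le_length (le_of_eq hA.symm), List.take_take]
          simp
        have hget : (ws.take crit ++ m :: ws.drop (crit + 2)).getD crit "" = m := by
          rw [List.getD_eq_getElem?_getD, List.getElem?_append_right (le_of_eq hA)]
          simp [hA]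
        have hdrop2 : (ws.take crit ++ m :: ws.drop (crit + 2)).drop (crit + 1) = ws.drop (crit + 2) := by
          rw [show crit + 1 = (ws.take crit).length + 1 by rw [hA], List.drop_append]
          simp
        rw [htake, hget, hdrop2]
        -- fold B's step on the right
        rw [hdrop]
        simp only [wlrLoopBd]
        rw [if_pos hin]
      · -- advance branch
        rw [ih ws (crit + 1) (by omega) h]
        rw [hdrop]
        simp only [wlrLoopBd]
        rw [if_neg hin]
        have : ws.take (crit + 1) = ws.take crit ++ [ws.getD crit ""] := by
          rw [List.take_add_one]
          simp [List.getD_eq_getElem?_getD, List.getElem?_eq_getElem hc]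
        rw [this]
        simp
    · -- loop ends: crit = length - 1, the remaining word is flushed alone
      rw [dif_neg h]
      have hdropnil : ws.drop (crit + 1) = [] := by
        apply List.drop_eq_nil_of_le; omega
      rw [hdropnil]
      simp only [wlrLoopBd]
      conv_lhs => rw [← List.take_append_drop crit ws]
      congr 1
      rw [List.drop_eq_getElem_cons hc, List.drop_eq_nil_of_le (by omega)]
      simp [List.getD_eq_getElem?_getD, List.getElem?_eq_getElem hc]

-- ===== VERDICT (by name: the statement is the Claim_ definition above) =====
theorem word_list_revise_spec : Claim_equal_word_list_revise := by
  intro listofWords chemical_list _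
  unfold Spec_word_list_revise
  match listofWords with
  | [] =>
    rw [show word_list_revise [] chemical_list = wlrLoopA chemical_list [] 0 from rfl, wlrLoopA]
    simp [word_list_revise_alt]
  | w :: rest =>
    rw [show word_list_revise_alt (w :: rest) chemical_list = wlrLoopB chemical_list w rest [] from rfl]
    rw [show word_list_revise (w :: rest) chemical_list = wlrLoopA chemical_list (w :: rest) 0 from rfl]
    rw [wlrLoopA_eq chemical_list (w :: rest).length (w :: rest) 0 (by omega) (by simp)]
    rw [wlrLoopB_eq_acc]
    simp
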